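-- pv_equiv track=rewrite | github.com/dativebase/old-pyramid | old/lib/orthography.py | get_orthography_as_list
-- ===== SOURCE A (Python) =====
-- def get_orthography_as_list(orthography):
--     """Returns orthography as a list of lists.
--
--     E.g.,   u'[a,a\u0301],b,c,d'    becomes
--             [[u'a',u'a\u0301'],[u'b'],[u'c'],[u'd']]
--
--     """
--
--     in_brackets = False
--     result = u''
--     for char in orthography:
--         if char == u'[':
--             in_brackets = True
--             char = u''
--         elif char == u']':
--             in_brackets = False
--             char = u''
--         if in_brackets and char == u',':
--             result += u'|'
--         else:
--             result += char
--     temp = result.split(',')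
--     result = [item.split('|') for item in temp]
--     return result
-- ===== SOURCE B (Python) =====
-- def get_orthography_as_list(orthography):
--     """Returns orthography as a list of lists.
--
--     Single-pass parser: builds the nested list directly during one scan,
--     keeping an explicit result/group/token state and a bracket flag.
--     """
--     result = []
--     group = []
--     token = ''
--     in_brackets = False
--     for char in orthography:
--         if char == '[':
--             in_brackets = True
--         elif char == ']':
--             in_brackets = False
--         elif char == ',':
--             group.append(token)
--             token = ''
--             if not in_brackets:
--                 result.append(group)
--                 group = []
--         else:
--             token += char
--     group.append(token)
--     result.append(group)
--     return result
-- ===== Notes on version B (the rewrite author's own statement) =====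
-- stated objective: alternative
-- what changed: B builds the nested list directly in one scan with explicit result/group/token state, instead of A's rewrite to a pipe-sentinel string followed by a comma split and a second split on the sentinel; Pre_ excludes strings containing a literal pipe character, where A's internal sentinel collides with the input and splits the token there while B keeps the character - either reading of this unspecified corner is defensible.
-- outside the precondition, e.g. on get_orthography_as_list('a|b'): A returns [['a', 'b']], B returns [['a|b']]; on get_orthography_as_list('|'): A returns [['', '']], B returns [['|']]
import Mathlib
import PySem

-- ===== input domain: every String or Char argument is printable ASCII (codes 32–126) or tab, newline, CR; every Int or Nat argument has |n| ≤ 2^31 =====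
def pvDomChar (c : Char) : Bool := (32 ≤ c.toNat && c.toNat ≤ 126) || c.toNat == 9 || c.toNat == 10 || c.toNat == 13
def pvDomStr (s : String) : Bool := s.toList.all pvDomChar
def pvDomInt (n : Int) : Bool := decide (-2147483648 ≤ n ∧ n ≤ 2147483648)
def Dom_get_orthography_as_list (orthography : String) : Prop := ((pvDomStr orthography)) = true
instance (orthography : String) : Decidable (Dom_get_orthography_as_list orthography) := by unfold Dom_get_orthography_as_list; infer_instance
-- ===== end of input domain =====

-- B: one-pass parser with explicit result/group/token state, instead of A's
-- pipe-sentinel string rewrite followed by two split passes (return value only; no mutation).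

-- ===== PORT A =====
def get_orthography_as_list (orthography : String) : List (List String) :=
  let st := orthography.toList.foldl (fun (st : Bool × List Char) char =>
    let p :=
      if char = '[' then (true, ([] : List Char))
      else if char = ']' then (false, ([] : List Char))
      else (st.1, [char])
    if p.1 = true ∧ p.2 = [','] then (p.1, st.2 ++ ['|'])
    else (p.1, st.2 ++ p.2)) (false, ([] : List Char))
  let temp := PySem.Chars.splitOn st.2 [',']
  temp.map (fun item => (PySem.Chars.splitOn item ['|']).map String.ofList)

-- ===== PORT B =====
def get_orthography_as_list_alt (orthography : String) : List (List String) :=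
  let st := orthography.toList.foldl
    (fun (st : Bool × List (List (List Char)) × List (List Char) × List Char) char =>
      let (b, res, grp, tok) := st
      if char = '[' then (true, res, grp, tok)
      else if char = ']' then (false, res, grp, tok)
      else if char = ',' then
        if b = false then (b, res ++ [grp ++ [tok]], [], [])
        else (b, res, grp ++ [tok], [])
      else (b, res, grp, tok ++ [char]))
    (false, [], [], [])
  (st.2.1 ++ [st.2.2.1 ++ [st.2.2.2]]).map (fun g => g.map String.ofList)

-- ===== PRECONDITION & SPEC =====
-- Pre_ excludes strings containing a literal pipe character: it has no meaning in the
-- bracketed orthography notation and A happens to split tokens at it (its internal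
-- sentinel collides with the input) while B keeps it literal — either reading is defensible.
def Pre_get_orthography_as_list (orthography : String) : Prop := '|' ∉ orthography.toList
instance (orthography : String) : Decidable (Pre_get_orthography_as_list orthography) := by unfold Pre_get_orthography_as_list; infer_instance
def pvWitness_get_orthography_as_list : String := "[a,b],c"

def Spec_get_orthography_as_list (orthography : String) (out : List (List String)) : Prop := out = get_orthography_as_list_alt orthography
instance (orthography : String) (out : List (List String)) : Decidable (Spec_get_orthography_as_list orthography out) := by unfold Spec_get_orthography_as_list; infer_instance

-- ===== CLAIM (what is proved, stated in full; the proofs are below) =====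
def Claim_equal_get_orthography_as_list : Prop := ∀ (orthography : String), Dom_get_orthography_as_list orthography → Pre_get_orthography_as_list orthography → Spec_get_orthography_as_list orthography (get_orthography_as_list orthography)

-- ===== LEMMAS AND PROOFS =====

-- the character stream A's loop appends to its sentinel string
def pvEmit : Bool → List Char → List Char
  | _, [] => []
  | b, c :: cs =>
    if c = '[' then pvEmit true cs
    else if c = ']' then pvEmit false cs
    else if b = true ∧ c = ',' then '|' :: pvEmit b cs
    else c :: pvEmit b cs

-- split on a single character, front-recursively
def pvSplit1 (s0 : Char) : List Char → List (List Char)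
  | [] => [[]]
  | c :: r => if c = s0 then [] :: pvSplit1 s0 r else (pvSplit1 s0 r).modifyHead (fun t => c :: t)

lemma pvSplit1_ne_nil (s0 : Char) (l : List Char) : pvSplit1 s0 l ≠ [] := by
  cases l with
  | nil => simp [pvSplit1]
  | cons c r =>
    simp only [pvSplit1]
    split_ifs
    · simp
    · cases h : pvSplit1 s0 r with
      | nil => exact absurd h (pvSplit1_ne_nil s0 r)
      | cons t ts => simp [h, List.modifyHead]

lemma pvGo_nil (sep cur : List Char) (acc : List (List Char)) (fuel : Nat) :
    PySem.Chars.splitOn.go sep (fuel+1) [] cur acc = (cur.reverse :: acc).reverse := by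
  rw [PySem.Chars.splitOn.go.eq_def]

lemma pvGo_cons (sep : List Char) (c : Char) (rest cur : List Char) (acc : List (List Char))
    (fuel : Nat) :
    PySem.Chars.splitOn.go sep (fuel+1) (c::rest) cur acc =
      (if sep.isPrefixOf (c::rest) = true then
        PySem.Chars.splitOn.go sep fuel (List.drop sep.length (c::rest)) [] (cur.reverse :: acc)
       else PySem.Chars.splitOn.go sep fuel rest (c :: cur) acc) := by
  rw [PySem.Chars.splitOn.go.eq_def]

lemma pvGo_spec (s0 : Char) (fuel : Nat) (l cur : List Char) (acc : List (List Char)) (h : l.length < fuel) :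
    PySem.Chars.splitOn.go [s0] fuel l cur acc =
      acc.reverse ++ (pvSplit1 s0 l).modifyHead (fun t => cur.reverse ++ t) := by
  induction fuel generalizing l cur acc with
  | zero => omega
  | succ fuel ih =>
    cases l with
    | nil =>
      rw [pvGo_nil]
      simp [pvSplit1, List.modifyHead]
    | cons c rest =>
      have hr : rest.length < fuel := by simpa using h
      rw [pvGo_cons]
      obtain ⟨t, ts, ht⟩ : ∃ t ts, pvSplit1 s0 rest = t :: ts := by
        cases hx : pvSplit1 s0 rest with
        | nil => exact absurd hx (pvSplit1_ne_nil s0 rest)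
        | cons t ts => exact ⟨t, ts, rfl⟩
      by_cases hc : c = s0
      · have hpre : List.isPrefixOf [s0] (c :: rest) = true := by
          simp [List.isPrefixOf, hc]
        rw [if_pos hpre]
        have hd : List.drop ([s0] : List Char).length (c :: rest) = rest := rfl
        rw [hd, ih rest [] (cur.reverse :: acc) hr]
        have hsp : pvSplit1 s0 (c :: rest) = [] :: pvSplit1 s0 rest := by
          simp [pvSplit1, hc]
        simp [hsp, ht, List.modifyHead]
      · have hpre : List.isPrefixOf [s0] (c :: rest) = false := by
          simp [List.isPrefixOf]
          exact fun hh => absurd hh.symm hc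
        rw [if_neg (by simp [hpre])]
        rw [ih rest (c :: cur) acc hr]
        have hsp : pvSplit1 s0 (c :: rest) = (pvSplit1 s0 rest).modifyHead (fun t => c :: t) := by
          simp [pvSplit1, hc]
        simp [hsp, ht, List.modifyHead]

lemma pvSplitOn_eq (s0 : Char) (l : List Char) :
    PySem.Chars.splitOn l [s0] = pvSplit1 s0 l := by
  unfold PySem.Chars.splitOn
  rw [pvGo_spec s0 (l.length + 1) l [] [] (by omega)]
  obtain ⟨t, ts, ht⟩ : ∃ t ts, pvSplit1 s0 l = t :: ts := by
    cases hx : pvSplit1 s0 l with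
    | nil => exact absurd hx (pvSplit1_ne_nil s0 l)
    | cons t ts => exact ⟨t, ts, rfl⟩
  simp [ht, List.modifyHead]

-- the direct two-level parse of A's emitted stream
def pvParse : List Char → List (List (List Char))
  | [] => [[[]]]
  | c :: cs =>
    if c = ',' then [[]] :: pvParse cs
    else if c = '|' then (pvParse cs).modifyHead (fun g => [] :: g)
    else (pvParse cs).modifyHead (fun g => g.modifyHead (fun t => c :: t))

lemma pvParse_eq (e : List Char) :
    pvParse e = (pvSplit1 ',' e).map (fun item => pvSplit1 '|' item) := by
  induction e with
  | nil => simp [pvParse, pvSplit1]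
  | cons c cs ih =>
    obtain ⟨t, ts, hs⟩ : ∃ t ts, pvSplit1 ',' cs = t :: ts := by
      cases hx : pvSplit1 ',' cs with
      | nil => exact absurd hx (pvSplit1_ne_nil ',' cs)
      | cons t ts => exact ⟨t, ts, rfl⟩
    by_cases h1 : c = ','
    · simp [pvParse, pvSplit1, h1, ih, pvSplit1_ne_nil]
    · by_cases h2 : c = '|'
      · simp only [pvParse, pvSplit1, if_neg h1, if_pos h2, ih, hs,
          if_neg (show ¬ c = ',' from h1), List.modifyHead, List.map_cons]
      · simp only [pvParse, pvSplit1, if_neg h1, if_neg h2, ih, hs, List.modifyHead,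
          List.map_cons]

-- A's loop accumulates exactly pvEmit
lemma pvFoldA (cs : List Char) : ∀ (b : Bool) (acc : List Char),
    (cs.foldl (fun (st : Bool × List Char) char =>
      let p :=
        if char = '[' then (true, ([] : List Char))
        else if char = ']' then (false, ([] : List Char))
        else (st.1, [char])
      if p.1 = true ∧ p.2 = [','] then (p.1, st.2 ++ ['|'])
      else (p.1, st.2 ++ p.2)) (b, acc)).2 = acc ++ pvEmit b cs := by
  induction cs with
  | nil => intro b acc; simp [pvEmit]
  | cons c cs ih =>
    intro b acc
    by_cases h1 : c = '['
    · simp [List.foldl_cons, h1, pvEmit, ih]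
    · by_cases h2 : c = ']'
      · simp [List.foldl_cons, h1, h2, pvEmit, ih]
      · by_cases h3 : b = true ∧ c = ','
        · simp [List.foldl_cons, h1, h2, h3, h3.1, h3.2, pvEmit, ih]
        · have : ¬ (b = true ∧ [c] = [',']) := by
            intro hh; exact h3 ⟨hh.1, by simpa using hh.2⟩
          simp only [List.foldl_cons, if_neg h1, if_neg h2]
          rw [if_neg this]
          simp only [pvEmit, if_neg h1, if_neg h2, if_neg h3]
          simp [ih]

-- B's direct parse of the remaining input, given the current bracket flag
def pvB : Bool → List Char → List (List (List Char))
  | _, [] => [[[]]]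
  | b, c :: cs =>
    if c = '[' then pvB true cs
    else if c = ']' then pvB false cs
    else if c = ',' then
      if b = false then [[]] :: pvB b cs
      else (pvB b cs).modifyHead (fun g => [] :: g)
    else (pvB b cs).modifyHead (fun g => g.modifyHead (fun t => c :: t))

lemma pvB_shape (b : Bool) (cs : List Char) : ∃ t ts Gs, pvB b cs = (t :: ts) :: Gs := by
  induction cs generalizing b with
  | nil => exact ⟨[], [], [], rfl⟩
  | cons c cs ih =>
    simp only [pvB]
    split_ifs
    · exact ih true
    · exact ih false
    · exact ⟨[], [], pvB b cs, rfl⟩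
    · obtain ⟨t, ts, Gs, hp⟩ := ih b
      exact ⟨[], t :: ts, Gs, by simp [hp, List.modifyHead]⟩
    · obtain ⟨t, ts, Gs, hp⟩ := ih b
      exact ⟨c :: t, ts, Gs, by simp [hp, List.modifyHead]⟩

-- glue a pending result/group/token prefix onto the parse of the remainder
def pvGlueTok (tok : List Char) : List (List Char) → List (List Char)
  | [] => [tok]
  | t :: ts => (tok ++ t) :: ts

def pvGlue (res : List (List (List Char))) (grp : List (List Char)) (tok : List Char) :
    List (List (List Char)) → List (List (List Char))
  | [] => res
  | G :: Gs => res ++ (grp ++ pvGlueTok tok G) :: Gs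

-- B's loop computes pvGlue of pvB
lemma pvFoldB (cs : List Char) : ∀ (b : Bool) (res : List (List (List Char)))
    (grp : List (List Char)) (tok : List Char),
    (let st := cs.foldl
      (fun (st : Bool × List (List (List Char)) × List (List Char) × List Char) char =>
        let (b, res, grp, tok) := st
        if char = '[' then (true, res, grp, tok)
        else if char = ']' then (false, res, grp, tok)
        else if char = ',' then
          if b = false then (b, res ++ [grp ++ [tok]], [], [])
          else (b, res, grp ++ [tok], [])
        else (b, res, grp, tok ++ [char]))
      (b, res, grp, tok)
     st.2.1 ++ [st.2.2.1 ++ [st.2.2.2]]) = pvGlue res grp tok (pvB b cs) := by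
  induction cs with
  | nil => intro b res grp tok; simp [pvB, pvGlue, pvGlueTok]
  | cons c cs ih =>
    intro b res grp tok
    obtain ⟨t, ts, Gs, hp⟩ := pvB_shape b cs
    by_cases h1 : c = '['
    · simp only [List.foldl_cons, if_pos h1]
      rw [ih]
      simp [pvB, h1]
    · by_cases h2 : c = ']'
      · simp only [List.foldl_cons, if_neg h1, if_pos h2]
        rw [ih]
        simp [pvB, h1, h2]
      · by_cases h3 : c = ','
        · cases b with
          | false =>
            simp only [List.foldl_cons, if_neg h1, if_neg h2, if_pos h3, if_pos rfl]
            rw [ih]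
            simp [pvB, h1, h2, h3, hp, pvGlue, pvGlueTok]
          | true =>
            simp only [List.foldl_cons, if_neg h1, if_neg h2, if_pos h3]
            rw [if_neg (by decide)]
            rw [ih]
            simp [pvB, h1, h2, h3, hp, pvGlue, pvGlueTok, List.modifyHead]
        · simp only [List.foldl_cons, if_neg h1, if_neg h2, if_neg h3]
          rw [ih]
          simp [pvB, h1, h2, h3, hp, pvGlue, pvGlueTok, List.modifyHead]

-- without a literal '|', A's emitted stream parses to exactly B's parse
lemma pvParse_emit_eq_pvB (cs : List Char) : ∀ (b : Bool), '|' ∉ cs →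
    pvParse (pvEmit b cs) = pvB b cs := by
  induction cs with
  | nil => intro b _; rfl
  | cons c cs ih =>
    intro b hbar
    have hc : c ≠ '|' := fun h => hbar (h ▸ List.mem_cons_self ..)
    have hcs : '|' ∉ cs := fun h => hbar (List.mem_cons_of_mem _ h)
    by_cases h1 : c = '['
    · simp [pvEmit, pvB, h1, ih true hcs]
    · by_cases h2 : c = ']'
      · simp [pvEmit, pvB, h1, h2, ih false hcs]
      · by_cases h3 : c = ','
        · cases b with
          | false =>
            have : ¬ ((false : Bool) = true ∧ c = ',') := by simp
            simp [pvEmit, pvB, h1, h2, h3, this, pvParse, ih false hcs]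
          | true =>
            simp [pvEmit, pvB, h1, h2, h3, pvParse, ih true hcs]
        · have : ¬ (b = true ∧ c = ',') := fun hh => h3 hh.2
          simp [pvEmit, pvB, h1, h2, h3, this, pvParse, ih b hcs, hc]

-- ===== VERDICT (by name: the statement is the Claim_ definition above) =====
theorem get_orthography_as_list_spec : Claim_equal_get_orthography_as_list := by
  intro orthography _ hP
  unfold Pre_get_orthography_as_list at hP
  unfold Spec_get_orthography_as_list get_orthography_as_list get_orthography_as_list_alt
  simp only []
  rw [pvFoldA orthography.toList false []]
  rw [pvFoldB orthography.toList false [] [] []]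
  obtain ⟨t, ts, Gs, hp⟩ := pvB_shape false orthography.toList
  have hpe := pvParse_emit_eq_pvB orthography.toList false hP
  simp only [List.nil_append, pvSplitOn_eq]
  have hkey : (pvSplit1 ',' (pvEmit false orthography.toList)).map
      (fun item => pvSplit1 '|' item) = (t :: ts) :: Gs := by
    rw [← pvParse_eq, hpe, hp]
  rw [hp]
  simp only [pvGlue, pvGlueTok, List.nil_append]
  rw [show (fun item => List.map String.ofList (pvSplit1 '|' item)) =
      (List.map String.ofList ∘ fun item => pvSplit1 '|' item) from rfl,
    ← List.map_map, hkey]
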